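-- pv_equiv track=rewrite | github.com/quadruplesec/University | FP/Playground Problems/Py08/Digits average.py | digits_average
-- ===== SOURCE A (Python) =====
-- import math
--
-- def average(a, b):
--     return math.ceil((a + b) / 2)
--
-- def digits_average(n):
--     if n < 10:
--         return n
--     def digits_average_rec(n, avg=0, power=0):
--         avg = avg + average(n % 10, (n//10) % 10) * 10**power
--         n = n // 10
--         power += 1
--         if n >= 10: return digits_average_rec(n, avg, power)
--         else: return digits_average(avg)
--
--     return digits_average_rec(n)
-- ===== SOURCE B (Python) =====
-- def digits_average(n):
--     while n >= 10:
--         ds = []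
--         m = n
--         while m > 0:
--             ds.append(m % 10)
--             m //= 10
--         avgs = [(x + y + 1) // 2 for x, y in zip(ds, ds[1:])]
--         n = 0
--         for d in reversed(avgs):
--             n = n * 10 + d
--     return n
-- ===== Notes on version B (the rewrite author's own statement) =====
-- stated objective: simpler
-- what changed: Replaces A's mutually recursive least-significant-first accumulator (avg + average*10**power with a recursive inner helper) by an explicit while loop whose body extracts the digit list once, zips adjacent digit pairs with ceiling averages, and folds the averaged digits back into a number.
import Mathlib
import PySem

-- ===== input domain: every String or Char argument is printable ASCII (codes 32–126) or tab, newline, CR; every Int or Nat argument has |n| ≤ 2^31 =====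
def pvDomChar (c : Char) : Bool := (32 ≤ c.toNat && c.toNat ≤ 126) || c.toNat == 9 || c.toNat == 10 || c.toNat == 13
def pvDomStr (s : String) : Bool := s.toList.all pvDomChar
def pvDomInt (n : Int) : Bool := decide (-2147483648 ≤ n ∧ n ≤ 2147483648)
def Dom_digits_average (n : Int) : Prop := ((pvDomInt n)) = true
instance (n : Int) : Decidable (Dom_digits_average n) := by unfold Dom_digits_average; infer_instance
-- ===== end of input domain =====

-- B replaces A's mutually recursive least-significant-first accumulator (avg/power arithmetic)
-- with an explicit loop that extracts the digit list once, zips adjacent pairs, and folds the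
-- averaged digits back into a number (objective: simpler decomposition; same cost).

-- ===== PORT A =====
-- math.ceil((a + b) / 2): ceiling division, exact here (the float quotient is exact for the
-- small integers A feeds it).
def pyAverage (a b : Int) : Int := -(PySem.Int.floordiv (-(a + b)) 2)

-- inner helper digits_average_rec; `f` is the enclosing digits_average (its tail call),
-- fuel only makes the recursion total (proven sufficient below, never exhausted for 10 ≤ n).
def daRecA : Nat → (Int → Int) → Int → Int → Nat → Int
  | 0, f, _, avg, _ => f avg
  | k+1, f, n, avg, power =>
    let avg' := avg + pyAverage (PySem.Int.mod n 10) (PySem.Int.mod (PySem.Int.floordiv n 10) 10) * 10 ^ power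
    let n' := PySem.Int.floordiv n 10
    if 10 ≤ n' then daRecA k f n' avg' (power + 1) else f avg'

-- outer recursion of A, fueled (fuel never exhausted: each round has at most n rounds)
def daA : Nat → Int → Int
  | 0, n => n
  | k+1, n => if n < 10 then n else daRecA n.toNat (daA k) n 0 0

def digits_average (n : Int) : Int := daA (n.toNat + 1) n

-- ===== PORT B =====
-- while m > 0: ds.append(m % 10); m //= 10
def toDigitsB (m : Int) : List Int :=
  if _h : 0 < m then PySem.Int.mod m 10 :: toDigitsB (PySem.Int.floordiv m 10) else []
  termination_by m.toNat
  decreasing_by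
    rw [PySem.Int.floordiv_eq_ediv_of_pos (by norm_num : (0:Int) < 10)]; omega

-- one body of the while loop: digit list, adjacent averages, fold back most-significant first
def stepB (n : Int) : Int :=
  let ds := toDigitsB n
  let avgs := List.zipWith (fun x y => PySem.Int.floordiv (x + y + 1) 2) ds (ds.drop 1)  -- zip(ds, ds[1:])
  avgs.reverse.foldl (fun acc d => acc * 10 + d) 0

-- while n >= 10, fueled (never exhausted: the loop runs at most n times)
def bLoop : Nat → Int → Int
  | 0, n => n
  | k+1, n => if 10 ≤ n then bLoop k (stepB n) else n

def digits_average_alt (n : Int) : Int := bLoop (n.toNat + 1) n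

-- ===== PRECONDITION & SPEC =====
def Spec_digits_average (n : Int) (out : Int) : Prop := out = digits_average_alt n
instance (n : Int) (out : Int) : Decidable (Spec_digits_average n out) := by unfold Spec_digits_average; infer_instance

-- ===== CLAIM (what is proved, stated in full; the proofs are below) =====
def Claim_equal_digits_average : Prop := ∀ (n : Int), Dom_digits_average n → Spec_digits_average n (digits_average n)

-- ===== LEMMAS AND PROOFS =====

-- the value of one pass of A's inner loop at power 0 and avg 0, as a recursion on n
def passA (n : Int) : Int :=
  if _h : 10 ≤ n then
    pyAverage (PySem.Int.mod n 10) (PySem.Int.mod (PySem.Int.floordiv n 10) 10)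
      + (if 10 ≤ PySem.Int.floordiv n 10 then 10 * passA (PySem.Int.floordiv n 10) else 0)
  else 0
  termination_by n.toNat
  decreasing_by
    rw [PySem.Int.floordiv_eq_ediv_of_pos (by norm_num : (0:Int) < 10)]; omega

theorem cavg_eq (a b : Int) : PySem.Int.floordiv (a + b + 1) 2 = pyAverage a b := by
  unfold pyAverage
  rw [PySem.Int.floordiv_eq_ediv_of_pos (by norm_num : (0:Int) < 2),
    PySem.Int.floordiv_eq_ediv_of_pos (by norm_num : (0:Int) < 2)]
  omega

theorem daRecA_eq (fuel : Nat) : ∀ (f : Int → Int) (n avg : Int) (power : Nat),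
    10 ≤ n → n.toNat ≤ fuel → daRecA fuel f n avg power = f (avg + passA n * 10 ^ power) := by
  induction fuel with
  | zero => intro f n avg power hn hf; omega
  | succ k ih =>
    intro f n avg power hn hf
    have hfd : PySem.Int.floordiv n 10 = n / 10 :=
      PySem.Int.floordiv_eq_ediv_of_pos (by norm_num)
    rw [daRecA, passA]
    simp only [hn, dif_pos]
    by_cases h : 10 ≤ PySem.Int.floordiv n 10
    · simp only [if_pos h]
      rw [ih f _ _ _ h (by rw [hfd] at h ⊢; omega)]
      congr 1; ring
    · simp only [if_neg h]
      congr 1; ring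

-- the digit-averaging zip-and-fold of B's loop body, on the digit list
def zfold (l : List Int) : Int :=
  ((List.zipWith (fun x y => PySem.Int.floordiv (x + y + 1) 2) l (l.drop 1)).reverse).foldl
    (fun acc d => acc * 10 + d) 0

theorem stepB_zfold (n : Int) : stepB n = zfold (toDigitsB n) := rfl

theorem zfold_cons (a b : Int) (t : List Int) :
    zfold (a :: b :: t) = zfold (b :: t) * 10 + PySem.Int.floordiv (a + b + 1) 2 := by
  unfold zfold
  simp [List.foldl_append]

theorem stepB_eq (n : Int) (hn : 10 ≤ n) : stepB n = passA n := by
  have h10 : (0:Int) < 10 := by norm_num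
  induction hi : n.toNat using Nat.strong_induction_on generalizing n with
  | _ m ih =>
  subst hi
  have hfd : PySem.Int.floordiv n 10 = n / 10 := PySem.Int.floordiv_eq_ediv_of_pos h10
  have hq : 0 < PySem.Int.floordiv n 10 := by rw [hfd]; omega
  rw [stepB_zfold, passA]
  simp only [hn, dif_pos]
  rw [toDigitsB]; simp only [dif_pos (show (0:Int) < n by omega)]
  rw [toDigitsB]; simp only [dif_pos hq]
  rw [zfold_cons, cavg_eq]
  by_cases h : 10 ≤ PySem.Int.floordiv n 10
  · rw [if_pos h]
    have ihv := ih (PySem.Int.floordiv n 10).toNat (by rw [hfd]; omega) _ h rfl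
    rw [stepB_zfold, toDigitsB] at ihv
    simp only [dif_pos hq] at ihv
    rw [ihv]; ring
  · rw [if_neg h]
    have hz : PySem.Int.floordiv (PySem.Int.floordiv n 10) 10 = 0 := by
      rw [PySem.Int.floordiv_eq_ediv_of_pos h10, hfd]
      rw [hfd] at h hq
      omega
    rw [toDigitsB, hz]
    simp [zfold]

theorem loops_eq (k : Nat) : ∀ n : Int, daA k n = bLoop k n := by
  induction k with
  | zero => intro n; rfl
  | succ m ih =>
    intro n
    rw [daA, bLoop]
    by_cases h : n < 10
    · rw [if_pos h, if_neg (by omega)]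
    · have h' : 10 ≤ n := by omega
      rw [if_neg h, if_pos h',
        daRecA_eq n.toNat (daA m) n 0 0 h' le_rfl, stepB_eq n h']
      simpa using ih (passA n)

-- ===== VERDICT (by name: the statement is the Claim_ definition above) =====
theorem digits_average_spec : Claim_equal_digits_average := by
  intro n _
  unfold Spec_digits_average digits_average digits_average_alt
  exact loops_eq (n.toNat + 1) n
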